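-- pv_equiv track=rewrite | github.com/ziraax/collatz | module1.py | classe_vol
-- ===== SOURCE A (Python) =====
-- def classe_vol(n):
--     """ Liste triée des entiers de temps de vol n """
--     res = [1]
--     for i in range(n):
--         t = []
--         for v in res:
--             if (v % 6 == 4) and (v > 4):
--                 t.append((v-1) // 3)
--             t.append(2*v)
--         res = list(t)
--     res.sort()
--     return res
-- ===== SOURCE B (Python) =====
-- def classe_vol(n):
--     """ Liste triée des entiers de temps de vol n """
--     res = []
--     stack = [(1, 0)]
--     while stack:
--         v, depth = stack.pop()
--         if depth >= n:
--             res.append(v)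
--             continue
--         stack.append((2 * v, depth + 1))
--         if v % 6 == 4 and v > 4:
--             stack.append(((v - 1) // 3, depth + 1))
--     res.sort()
--     return res
-- ===== Notes on version B (the rewrite author's own statement) =====
-- stated objective: alternative
-- what changed: Replaces the breadth-first level-by-level list rebuilding (n passes, each creating a fresh level list) with a recursive depth-first traversal of the reverse-Collatz preimage tree that appends leaves at depth n to one accumulator, then sorts.
import Mathlib
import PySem

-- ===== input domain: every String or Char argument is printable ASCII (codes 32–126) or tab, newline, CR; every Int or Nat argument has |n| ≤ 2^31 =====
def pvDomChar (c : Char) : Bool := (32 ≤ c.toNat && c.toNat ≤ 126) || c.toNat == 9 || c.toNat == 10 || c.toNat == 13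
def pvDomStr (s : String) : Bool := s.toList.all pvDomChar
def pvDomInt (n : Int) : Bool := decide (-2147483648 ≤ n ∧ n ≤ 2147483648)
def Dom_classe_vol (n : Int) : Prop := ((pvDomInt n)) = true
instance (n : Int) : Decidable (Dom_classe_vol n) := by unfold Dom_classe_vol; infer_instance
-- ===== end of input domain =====

-- B replaces A's breadth-first level rebuilding with an explicit-stack depth-first
-- traversal of the reverse-Collatz tree (objective: alternative decomposition).

-- ===== PORT A =====
def classe_vol (n : Int) : List Int :=
  let res := (PySem.List.pyRange 0 n 1).foldl (fun res _ =>
    res.foldl (fun t v =>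
      (if PySem.Int.mod v 6 = 4 ∧ v > 4 then t ++ [PySem.Int.floordiv (v - 1) 3] else t)
        ++ [2 * v]) []) [1]
  PySem.List.sorted res (fun x => x) false

-- ===== PORT B =====
-- the while-loop of Source B; a stack entry (v, depth) of Source B is carried as
-- (v, remaining) with remaining = (n - depth), a Nat fuel, so the test
-- `depth >= n` is `remaining = 0` (exact: depth only grows, n is fixed, and the
-- initial depth 0 gives remaining = n.toNat, which is 0 exactly when 0 >= n).
-- The list head is the stack top (Python pops from the end).
def cvLoop : List (Int × Nat) → List Int → List Int
  | [], res => res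
  | (v, 0) :: st, res => cvLoop st (res ++ [v])
  | (v, m + 1) :: st, res =>
      cvLoop ((if PySem.Int.mod v 6 = 4 ∧ v > 4
                then [(PySem.Int.floordiv (v - 1) 3, m)] else [])
              ++ (2 * v, m) :: st) res
termination_by st _ => (st.map (fun p => 3 ^ p.2)).sum
decreasing_by
  · simp only [List.map_cons, List.sum_cons, pow_zero]
    omega
  · have h : 0 < 3 ^ m := Nat.pow_pos (by norm_num)
    split_ifs <;>
      simp only [List.map_cons, List.map_append, List.sum_cons, List.sum_append,
        List.map_nil, List.sum_nil, pow_succ] <;> omega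

def classe_vol_alt (n : Int) : List Int :=
  PySem.List.sorted (cvLoop [(1, n.toNat)] []) (fun x => x) false

-- ===== PRECONDITION & SPEC =====
def Spec_classe_vol (n : Int) (out : List Int) : Prop := out = classe_vol_alt n
instance (n : Int) (out : List Int) : Decidable (Spec_classe_vol n out) := by unfold Spec_classe_vol; infer_instance

-- ===== CLAIM (what is proved, stated in full; the proofs are below) =====
def Claim_equal_classe_vol : Prop := ∀ (n : Int), Dom_classe_vol n → Spec_classe_vol n (classe_vol n)

-- ===== LEMMAS AND PROOFS =====

-- leaves at depth m below v in the reverse-Collatz tree (proof-side characterisation)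
def cvLeaves (v : Int) : Nat → List Int
  | 0 => [v]
  | m + 1 =>
    (if PySem.Int.mod v 6 = 4 ∧ v > 4 then cvLeaves (PySem.Int.floordiv (v - 1) 3) m else [])
      ++ cvLeaves (2 * v) m

-- one BFS step of A's inner loop expands every element into its children
def cvChildren (v : Int) : List Int :=
  (if PySem.Int.mod v 6 = 4 ∧ v > 4 then [PySem.Int.floordiv (v - 1) 3] else []) ++ [2 * v]

def cvStep (l : List Int) : List Int :=
  l.foldl (fun t v =>
    (if PySem.Int.mod v 6 = 4 ∧ v > 4 then t ++ [PySem.Int.floordiv (v - 1) 3] else t)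
      ++ [2 * v]) []

theorem cvStep_foldl (l : List Int) (t0 : List Int) :
    l.foldl (fun t v =>
      (if PySem.Int.mod v 6 = 4 ∧ v > 4 then t ++ [PySem.Int.floordiv (v - 1) 3] else t)
        ++ [2 * v]) t0 = t0 ++ l.flatMap cvChildren := by
  induction l generalizing t0 with
  | nil => simp
  | cons v l ih =>
    simp only [List.foldl_cons, List.flatMap_cons, ih, cvChildren]
    split_ifs <;> simp

theorem cvStep_eq (l : List Int) : cvStep l = l.flatMap cvChildren := by
  unfold cvStep; rw [cvStep_foldl]; simp

-- A's outer loop depends only on the number of iterations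
theorem foldl_const_iterate (L : List Int) (init : List Int) :
    L.foldl (fun r _ => cvStep r) init = cvStep^[L.length] init := by
  induction L generalizing init with
  | nil => simp
  | cons a L ih => simp [ih, Function.iterate_succ_apply]

-- m BFS steps = the leaves at depth m, parent by parent, in the same order
theorem iterate_eq_flatMap_leaves (m : Nat) (l : List Int) :
    cvStep^[m] l = l.flatMap (fun v => cvLeaves v m) := by
  induction m generalizing l with
  | zero => simp [cvLeaves]
  | succ m ih =>
    rw [Function.iterate_succ_apply, ih, cvStep_eq, List.flatMap_assoc]
    refine List.flatMap_congr (fun v _ => ?_)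
    simp only [cvChildren, cvLeaves, List.flatMap_append, List.flatMap_cons,
      List.flatMap_nil, List.append_nil]
    split_ifs <;> simp

-- the DFS stack loop flushes, left to right, the leaves below each stack entry
theorem cvLoop_eq (st : List (Int × Nat)) (res : List Int) :
    cvLoop st res = res ++ st.flatMap (fun p => cvLeaves p.1 p.2) := by
  induction st, res using cvLoop.induct with
  | case1 res => simp [cvLoop]
  | case2 v st res ih => simp [cvLoop, cvLeaves, ih]
  | case3 v m st res ih =>
    rw [cvLoop]
    have hleaf : cvLeaves v (m + 1) =
        (if PySem.Int.mod v 6 = 4 ∧ v > 4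
          then cvLeaves (PySem.Int.floordiv (v - 1) 3) m else []) ++ cvLeaves (2 * v) m := rfl
    split_ifs at ih hleaf ⊢ with hc <;> rw [ih] <;> simp [hleaf]

-- ===== VERDICT (by name: the statement is the Claim_ definition above) =====
theorem classe_vol_spec : Claim_equal_classe_vol := by
  intro n _
  show classe_vol n = classe_vol_alt n
  unfold classe_vol classe_vol_alt
  have h : (PySem.List.pyRange 0 n 1).foldl (fun res _ =>
      res.foldl (fun t v =>
        (if PySem.Int.mod v 6 = 4 ∧ v > 4 then t ++ [PySem.Int.floordiv (v - 1) 3] else t)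
          ++ [2 * v]) []) [1] = cvLoop [(1, n.toNat)] [] := by
    have hA := foldl_const_iterate (PySem.List.pyRange 0 n 1) [1]
    simp only [cvStep] at hA
    rw [hA, PySem.List.length_pyRange_one, iterate_eq_flatMap_leaves, cvLoop_eq]
    simp
  rw [h]
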